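-- pv_equiv track=rewrite | github.com/diegosorrilha/sapevoweb | core/views.py | _gerar_combinacoes_criterios
-- ===== SOURCE A (Python) =====
-- from itertools import product
--
-- def _gerar_combinacoes_criterios(criterios):
--     criterios_keys = criterios
--
--     # criterios_keys = criterios.keys()
--     # criterios_keys = ['c1', 'c2', 'c3', 'c4']
--
--     # permsList = []
--     genComb = product(criterios_keys, repeat=2)
--
--     combinacoes = []
--     for subset in genComb:
--         l = list(subset)
--         l.reverse()
--         subset_reversed = tuple(l)
--
--         if not subset[0] == subset[1]:
--             if subset not in combinacoes  and subset_reversed not in combinacoes: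
--                 combinacoes.append(subset)
--
--     return combinacoes
-- ===== SOURCE B (Python) =====
-- def _pairs(rest):
--     if not rest:
--         return []
--     u, tail = rest[0], rest[1:]
--     return [(u, v) for v in tail] + _pairs(tail)
--
-- def _gerar_combinacoes_criterios(criterios):
--     seen = []
--     for c in criterios:
--         if c not in seen:
--             seen.append(c)
--     return _pairs(seen)
-- ===== Notes on version B (the rewrite author's own statement) =====
-- stated objective: faster
-- what changed: Instead of scanning all n^2 ordered pairs and filtering each against the growing result list, B first collapses criterios to its distinct values in first-occurrence order with one accumulator pass and then emits the upper-triangular pairs of that list directly, with no membership tests on the result.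
import Mathlib
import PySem

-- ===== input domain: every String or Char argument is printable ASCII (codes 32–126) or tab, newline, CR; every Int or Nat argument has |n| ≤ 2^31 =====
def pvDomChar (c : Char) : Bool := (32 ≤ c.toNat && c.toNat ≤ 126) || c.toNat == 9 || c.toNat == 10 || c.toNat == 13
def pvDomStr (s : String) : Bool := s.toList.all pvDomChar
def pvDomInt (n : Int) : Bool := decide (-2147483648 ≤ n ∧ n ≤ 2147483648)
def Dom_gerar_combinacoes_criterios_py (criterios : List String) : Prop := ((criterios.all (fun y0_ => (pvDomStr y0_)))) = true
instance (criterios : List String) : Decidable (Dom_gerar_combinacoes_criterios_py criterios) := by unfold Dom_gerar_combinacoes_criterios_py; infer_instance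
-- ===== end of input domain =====

-- B replaces A's filtered scan of all n^2 ordered pairs by a dedup-first pass plus one
-- upper-triangular pass over the distinct values (measured much faster on large inputs).

-- ===== PORT A =====
-- loop body of A; subset is always a 2-element list, so getD with a dummy default is exact for subset[0]/subset[1]
def pvStepA (combinacoes : List (List String)) (subset : List String) : List (List String) :=
  let subset_reversed := subset.reverse
  if ¬ (subset.getD 0 "" = subset.getD 1 "") then
    if subset ∉ combinacoes ∧ subset_reversed ∉ combinacoes then combinacoes ++ [subset]
    else combinacoes
  else combinacoes

-- product(criterios, repeat=2) is the flatMap of ordered pairs in the same order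
def gerar_combinacoes_criterios_py (criterios : List String) : List (List String) :=
  (criterios.flatMap (fun a => criterios.map (fun b => [a, b]))).foldl pvStepA []

-- ===== PORT B =====
-- the dedup loop of Source B
def pvDedup (criterios : List String) : List String :=
  criterios.foldl (fun seen c => if c ∈ seen then seen else seen ++ [c]) []

-- _pairs of Source B: recursion on rest = rest[0], rest[1:]
def pvPairs : List String → List (List String)
  | [] => []
  | u :: tail => tail.map (fun v => [u, v]) ++ pvPairs tail

def gerar_combinacoes_criterios_py_alt (criterios : List String) : List (List String) :=
  pvPairs (pvDedup criterios)

-- ===== PRECONDITION & SPEC =====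
def Spec_gerar_combinacoes_criterios_py (criterios : List String) (out : List (List String)) : Prop := out = gerar_combinacoes_criterios_py_alt criterios
instance (criterios : List String) (out : List (List String)) : Decidable (Spec_gerar_combinacoes_criterios_py criterios out) := by unfold Spec_gerar_combinacoes_criterios_py; infer_instance

-- ===== CLAIM (what is proved, stated in full; the proofs are below) =====
def Claim_equal_gerar_combinacoes_criterios_py : Prop := ∀ (criterios : List String), Dom_gerar_combinacoes_criterios_py criterios → Spec_gerar_combinacoes_criterios_py criterios (gerar_combinacoes_criterios_py criterios)

-- ===== LEMMAS AND PROOFS =====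

-- distinct elements of a list not in S, in first-occurrence order
def dskip (S : List String) : List String → List String
  | [] => []
  | b :: bs => if b ∈ S then dskip S bs else b :: dskip (S ++ [b]) bs

-- pairs [u,v] with u in ds and v after u in ds or in todo
def triBand (todo : List String) : List String → List (List String)
  | [] => []
  | u :: ds => (ds ++ todo).map (fun v => [u, v]) ++ triBand todo ds

theorem foldl_dedup (l S : List String) :
    l.foldl (fun seen c => if c ∈ seen then seen else seen ++ [c]) S = S ++ dskip S l := by
  induction l generalizing S with
  | nil => simp [dskip]
  | cons b bs ih =>
    simp only [List.foldl_cons, dskip]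
    by_cases h : b ∈ S
    · simp [h, ih]
    · simp [h, ih (S ++ [b])]

theorem dskip_not_mem {x : String} {S l : List String} (h : x ∈ dskip S l) : x ∉ S := by
  induction l generalizing S with
  | nil => simp [dskip] at h
  | cons b bs ih =>
    simp only [dskip] at h
    split at h
    · exact ih h
    · rcases List.mem_cons.1 h with rfl | h
      · assumption
      · intro hx; exact (ih h) (List.mem_append_left _ hx)

theorem dskip_mem {b : String} {l : List String} (S : List String) (h : b ∈ l) :
    b ∈ S ++ dskip S l := by
  induction l generalizing S with
  | nil => simp at h
  | cons c cs ih =>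
    simp only [dskip]
    rcases List.mem_cons.1 h with rfl | h
    · by_cases hc : b ∈ S
      · exact List.mem_append_left _ hc
      · simp [hc]
    · by_cases hc : c ∈ S
      · simp only [if_pos hc]; exact ih S h
      · simp only [if_neg hc]
        rcases List.mem_append.1 (ih (S ++ [c]) h) with hm | hm
        · rcases List.mem_append.1 hm with hm | hm
          · exact List.mem_append_left _ hm
          · simp at hm; simp [hm]
        · simp [hm]

theorem dskip_nodup (l S : List String) : (dskip S l).Nodup := by
  induction l generalizing S with
  | nil => simp [dskip]
  | cons b bs ih =>
    simp only [dskip]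
    split
    · exact ih S
    · refine List.nodup_cons.2 ⟨fun hb => ?_, ih (S ++ [b])⟩
      exact (dskip_not_mem hb) (by simp)

theorem dskip_subset_filter (l : List String) : ∀ (S T : List String), (∀ x ∈ S, x ∈ T) →
    dskip T l = (dskip S l).filter (fun x => decide (x ∉ T)) := by
  induction l with
  | nil => intro S T _; simp [dskip]
  | cons b bs ih =>
    intro S T hST
    by_cases hbT : b ∈ T
    · by_cases hbS : b ∈ S
      · simp only [dskip, if_pos hbT, if_pos hbS]
        exact ih S T hST
      · simp only [dskip, if_pos hbT, if_neg hbS, List.filter_cons]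
        have hb' : (decide (b ∉ T)) = false := by simp [hbT]
        rw [hb']
        refine ih (S ++ [b]) T ?_
        intro x hx
        rcases List.mem_append.1 hx with h | h
        · exact hST x h
        · simp at h; subst h; exact hbT
    · have hbS : b ∉ S := fun h => hbT (hST b h)
      simp only [dskip, if_neg hbT, if_neg hbS, List.filter_cons]
      have hb' : (decide (b ∉ T)) = true := by simp [hbT]
      rw [hb']
      refine congrArg (b :: ·) ?_
      have hsub : ∀ x ∈ S ++ [b], x ∈ T ++ [b] := by
        intro x hx
        rcases List.mem_append.1 hx with h | h
        · exact List.mem_append_left _ (hST x h)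
        · exact List.mem_append_right _ h
      rw [ih (S ++ [b]) (T ++ [b]) hsub]
      refine List.filter_congr ?_
      intro x hx
      have hxb : x ∉ S ++ [b] := dskip_not_mem hx
      have hne : x ≠ b := fun h => hxb (by simp [h])
      simp [hne]

theorem pvPairs_eq_triBand (ds : List String) : pvPairs ds = triBand [] ds := by
  induction ds with
  | nil => rfl
  | cons u t ih => simp [pvPairs, triBand, ih]

theorem mem_triBand_fst {x y : String} {todo ds : List String}
    (h : [x, y] ∈ triBand todo ds) : x ∈ ds := by
  induction ds with
  | nil => simp [triBand] at h
  | cons u t ih =>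
    simp only [triBand, List.mem_append] at h
    rcases h with h | h
    · rcases List.mem_map.1 h with ⟨v, _, hv⟩
      simp only [List.cons.injEq] at hv
      simp [hv.1]
    · exact List.mem_cons_of_mem _ (ih h)

theorem mem_triBand_of_mem_todo {x y : String} {todo ds : List String}
    (hx : x ∈ ds) (hy : y ∈ todo) : [x, y] ∈ triBand todo ds := by
  induction ds with
  | nil => simp at hx
  | cons u t ih =>
    simp only [triBand, List.mem_append]
    rcases List.mem_cons.1 hx with rfl | hx
    · exact Or.inl (List.mem_map.2 ⟨y, List.mem_append_right _ hy, rfl⟩)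
    · exact Or.inr (ih hx)

theorem mem_triBand_of_both {x y : String} {todo ds : List String}
    (hx : x ∈ ds) (hy : y ∈ ds) (hxy : x ≠ y) :
    [x, y] ∈ triBand todo ds ∨ [y, x] ∈ triBand todo ds := by
  induction ds with
  | nil => simp at hx
  | cons u t ih =>
    simp only [triBand, List.mem_append]
    rcases List.mem_cons.1 hx with hxu | hx'
    · subst hxu
      have hy' : y ∈ t := by
        rcases List.mem_cons.1 hy with h | h
        · exact absurd h.symm hxy
        · exact h
      exact Or.inl (Or.inl (List.mem_map.2 ⟨y, List.mem_append_left _ hy', rfl⟩))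
    · rcases List.mem_cons.1 hy with hyu | hy'
      · subst hyu
        exact Or.inr (Or.inl (List.mem_map.2 ⟨x, List.mem_append_left _ hx', rfl⟩))
      · rcases ih hx' hy' with h | h
        · exact Or.inl (Or.inr h)
        · exact Or.inr (Or.inr h)

theorem triBand_snoc (todo ds : List String) (c : String) :
    triBand todo (ds ++ [c]) = triBand (c :: todo) ds ++ todo.map (fun v => [c, v]) := by
  induction ds with
  | nil => simp [triBand]
  | cons u t ih => simp [triBand, ih]

theorem foldl_flatMap {α β γ : Type} (g : α → List β) (f : γ → β → γ) (l : List α) (i : γ) :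
    (l.flatMap g).foldl f i = l.foldl (fun a x => (g x).foldl f a) i := by
  induction l generalizing i with
  | nil => rfl
  | cons x xs ih => simp [List.flatMap_cons, List.foldl_append, ih]

theorem pvStepA_pair (comb : List (List String)) (a b : String) :
    pvStepA comb [a, b] =
      if a = b then comb
      else if [a, b] ∈ comb ∨ [b, a] ∈ comb then comb else comb ++ [[a, b]] := by
  show (if ¬ (a = b) then
          if [a, b] ∉ comb ∧ [a, b].reverse ∉ comb then comb ++ [[a, b]] else comb
        else comb) = _
  by_cases hab : a = b
  · simp [hab]
  · by_cases h1 : [a, b] ∈ comb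
    · simp [hab, h1]
    · by_cases h2 : [b, a] ∈ comb <;> simp [hab, h1, h2]

theorem nodup_disj {done todo' : List String} {c x : String}
    (hnd : (done ++ c :: todo').Nodup) (hx : x ∈ done) (hy : x ∈ c :: todo') : False := by
  rw [List.nodup_append] at hnd
  exact hnd.2.2 x hx x hy rfl

theorem inner_new (c : String) (bs : List String) :
    ∀ (done added todo'' todo' : List String),
    (done ++ c :: todo').Nodup → added ++ todo'' = todo' →
    dskip (done ++ c :: added) bs = todo'' →
    bs.foldl (fun comb b => pvStepA comb [c, b])
        (triBand (c :: todo') done ++ added.map (fun v => [c, v]))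
      = triBand (c :: todo') done ++ todo'.map (fun v => [c, v]) := by
  induction bs with
  | nil =>
    intro done added todo'' todo' hnd hsum hsk
    simp only [dskip] at hsk
    subst hsk
    simp only [List.append_nil] at hsum
    simp [hsum]
  | cons b bs ih =>
    intro done added todo'' todo' hnd hsum hsk
    have hcdone : c ∉ done := fun hc => nodup_disj hnd hc (List.mem_cons_self ..)
    simp only [List.foldl_cons]
    by_cases hbc : c = b
    · have hstep : pvStepA (triBand (c :: todo') done ++ added.map (fun v => [c, v])) [c, b]
          = triBand (c :: todo') done ++ added.map (fun v => [c, v]) := by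
        rw [pvStepA_pair]; simp [hbc]
      rw [hstep]
      have hbS : b ∈ done ++ c :: added := by simp [← hbc]
      simp only [dskip, if_pos hbS] at hsk
      exact ih done added todo'' todo' hnd hsum hsk
    · by_cases hbdone : b ∈ done
      · have hmem : [b, c] ∈ triBand (c :: todo') done :=
          mem_triBand_of_mem_todo hbdone (List.mem_cons_self ..)
        have hstep : pvStepA (triBand (c :: todo') done ++ added.map (fun v => [c, v])) [c, b]
            = triBand (c :: todo') done ++ added.map (fun v => [c, v]) := by
          rw [pvStepA_pair, if_neg hbc,
            if_pos (Or.inr (List.mem_append_left _ hmem))]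
        rw [hstep]
        have hbS : b ∈ done ++ c :: added := List.mem_append_left _ hbdone
        simp only [dskip, if_pos hbS] at hsk
        exact ih done added todo'' todo' hnd hsum hsk
      · by_cases hbadd : b ∈ added
        · have hstep : pvStepA (triBand (c :: todo') done ++ added.map (fun v => [c, v])) [c, b]
              = triBand (c :: todo') done ++ added.map (fun v => [c, v]) := by
            rw [pvStepA_pair, if_neg hbc,
              if_pos (Or.inl (List.mem_append_right _ (List.mem_map.2 ⟨b, hbadd, rfl⟩)))]
          rw [hstep]
          have hbS : b ∈ done ++ c :: added := by simp [hbadd]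
          simp only [dskip, if_pos hbS] at hsk
          exact ih done added todo'' todo' hnd hsum hsk
        · -- b is new: it is appended
          have hbS : b ∉ done ++ c :: added := by
            simp only [List.mem_append, List.mem_cons, not_or]
            exact ⟨hbdone, fun h => hbc h.symm, hbadd⟩
          simp only [dskip, if_neg hbS] at hsk
          have hnotin : ¬ ([c, b] ∈ triBand (c :: todo') done ++ added.map (fun v => [c, v]) ∨
                 [b, c] ∈ triBand (c :: todo') done ++ added.map (fun v => [c, v])) := by
            rintro (h | h) <;> rcases List.mem_append.1 h with h | h
            · exact hcdone (mem_triBand_fst h)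
            · rcases List.mem_map.1 h with ⟨v, hv, he⟩
              have hvb : v = b := by
                simp only [List.cons.injEq] at he
                tauto
              exact hbadd (hvb ▸ hv)
            · exact hbdone (mem_triBand_fst h)
            · rcases List.mem_map.1 h with ⟨v, hv, he⟩
              have hcb : c = b := by
                simp only [List.cons.injEq] at he
                tauto
              exact hbc hcb
          have hstep : pvStepA (triBand (c :: todo') done ++ added.map (fun v => [c, v])) [c, b]
              = triBand (c :: todo') done ++ (added ++ [b]).map (fun v => [c, v]) := by
            rw [pvStepA_pair, if_neg hbc, if_neg hnotin]
            simp
          rw [hstep]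
          have harr : done ++ c :: (added ++ [b]) = (done ++ c :: added) ++ [b] := by simp
          refine ih done (added ++ [b]) (dskip ((done ++ c :: added) ++ [b]) bs) todo' hnd ?_ ?_
          · rw [← hsum, ← hsk]; simp
          · rw [harr]

theorem inner_old (c : String) (bs : List String) (done todo : List String)
    (hc : c ∈ done) (_hnd : (done ++ todo).Nodup)
    (hbs : ∀ b ∈ bs, b ∈ done ++ todo) :
    bs.foldl (fun comb b => pvStepA comb [c, b]) (triBand todo done) = triBand todo done := by
  induction bs with
  | nil => rfl
  | cons b bs ih =>
    simp only [List.foldl_cons]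
    have hstep : pvStepA (triBand todo done) [c, b] = triBand todo done := by
      rw [pvStepA_pair]
      by_cases hbc : c = b
      · simp [hbc]
      · have hb := hbs b (List.mem_cons_self ..)
        have hmem : [c, b] ∈ triBand todo done ∨ [b, c] ∈ triBand todo done := by
          rcases List.mem_append.1 hb with hb | hb
          · exact mem_triBand_of_both hc hb hbc
          · exact Or.inl (mem_triBand_of_mem_todo hc hb)
        simp [hbc, hmem]
    rw [hstep]
    exact ih (fun x hx => hbs x (List.mem_cons_of_mem _ hx))

theorem filter_split (done todo' : List String) (c : String)
    (hnd : (done ++ c :: todo').Nodup) :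
    (done ++ c :: todo').filter (fun x => decide (x ∉ done ++ [c])) = todo' := by
  rw [List.filter_append, List.filter_cons]
  have h1 : done.filter (fun x => decide (x ∉ done ++ [c])) = [] := by
    apply List.filter_eq_nil_iff.2
    intro x hx
    simp [List.mem_append_left _ hx]
  have h2 : (decide (c ∉ done ++ [c])) = false := by simp
  rw [h1, h2, List.nil_append]
  simp only [Bool.false_eq_true, if_false]
  apply List.filter_eq_self.2
  intro x hx
  have hxd : x ∉ done := fun h => nodup_disj hnd h (List.mem_cons_of_mem _ hx)
  have hxc : x ≠ c := by
    have hnd' : (c :: todo').Nodup := (List.nodup_append.1 hnd).2.1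
    intro h
    exact (List.nodup_cons.1 hnd').1 (h ▸ hx)
  simp [hxd, hxc]

theorem outer (criterios : List String) (os : List String) :
    ∀ (done todo : List String),
    done ++ todo = dskip [] criterios → (done ++ todo).Nodup →
    dskip done os = todo →
    os.foldl (fun comb a => criterios.foldl (fun comb b => pvStepA comb [a, b]) comb)
        (triBand todo done)
      = triBand [] (dskip [] criterios) := by
  induction os with
  | nil =>
    intro done todo hD hnd hsk
    simp only [dskip] at hsk
    subst hsk
    simp only [List.append_nil] at hD
    rw [List.foldl_nil, hD]
  | cons c os ih =>
    intro done todo hD hnd hsk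
    simp only [List.foldl_cons]
    by_cases hcdone : c ∈ done
    · rw [inner_old c criterios done todo hcdone hnd
        (fun b hb => hD ▸ dskip_mem [] hb)]
      simp only [dskip, if_pos hcdone] at hsk
      exact ih done todo hD hnd hsk
    · simp only [dskip, if_neg hcdone] at hsk
      obtain ⟨todo', rfl⟩ : ∃ todo', todo = c :: todo' := ⟨dskip (done ++ [c]) os, hsk.symm⟩
      have hsk' : dskip (done ++ [c]) os = todo' := by
        exact (List.cons.injEq .. ▸ hsk).2
      have hdcrit : dskip (done ++ [c]) criterios = todo' := by
        rw [dskip_subset_filter criterios [] (done ++ [c]) (by simp), ← hD]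
        exact filter_split done todo' c hnd
      have hinner := inner_new c criterios done [] todo' todo' hnd (by simp)
        (by simpa using hdcrit)
      simp only [List.map_nil, List.append_nil] at hinner
      rw [hinner, ← triBand_snoc]
      exact ih (done ++ [c]) todo' (by simpa using hD) (by simpa using hnd) hsk'

theorem main_eq (criterios : List String) :
    gerar_combinacoes_criterios_py criterios = gerar_combinacoes_criterios_py_alt criterios := by
  unfold gerar_combinacoes_criterios_py gerar_combinacoes_criterios_py_alt pvDedup
  rw [foldl_flatMap, foldl_dedup, List.nil_append, pvPairs_eq_triBand]
  simp only [List.foldl_map]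
  have h0 : ([] : List (List String)) = triBand (dskip [] criterios) [] := rfl
  rw [h0]
  exact outer criterios criterios [] (dskip [] criterios) (by simp)
    (by simpa using dskip_nodup criterios []) rfl

-- ===== VERDICT (by name: the statement is the Claim_ definition above) =====
theorem gerar_combinacoes_criterios_py_spec : Claim_equal_gerar_combinacoes_criterios_py := by
  intro criterios _
  unfold Spec_gerar_combinacoes_criterios_py
  exact main_eq criterios
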